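-- pv_equiv track=rewrite | github.com/jaredcat/Compilers | Project 2/Project2-1.py | language
-- ===== SOURCE A (Python) =====
-- def language(w):
--     wlist = list(w)
--     #if the first letter is "a"
--     if wlist[0] == "a":
--         #loop though all letters in input
--         for i, j in enumerate(wlist):
--             #lets a* loop.
--             if j != "a":
--                 if i+1 != len(wlist):
--                     return "rejected"
--                 elif j == "b":
--                     return "accepted"
--         return "rejected"
--     #if the first letter is "b"
--     elif wlist[0] == "b":
--         for i in wlist:
--             #the word can only contain "b"
--             if i != "b":
--                 return "rejected"
--         #the word is composed of only 'B's and is accepted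
--         return "accepted"
--     #no valid input found
--     return "rejected"
-- ===== SOURCE B (Python) =====
-- import re
--
-- def language(w):
--     first = w[0]
--     if first == "a":
--         return "accepted" if re.fullmatch(r"a*b", w) else "rejected"
--     elif first == "b":
--         return "accepted" if re.fullmatch(r"b+", w) else "rejected"
--     return "rejected"
-- ===== Notes on version B (the rewrite author's own statement) =====
-- stated objective: idiomatic
-- what changed: Replaces the hand-written enumerate/index automaton scans with re.fullmatch against a*b and b+ after the same first-character dispatch.
import Mathlib
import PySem

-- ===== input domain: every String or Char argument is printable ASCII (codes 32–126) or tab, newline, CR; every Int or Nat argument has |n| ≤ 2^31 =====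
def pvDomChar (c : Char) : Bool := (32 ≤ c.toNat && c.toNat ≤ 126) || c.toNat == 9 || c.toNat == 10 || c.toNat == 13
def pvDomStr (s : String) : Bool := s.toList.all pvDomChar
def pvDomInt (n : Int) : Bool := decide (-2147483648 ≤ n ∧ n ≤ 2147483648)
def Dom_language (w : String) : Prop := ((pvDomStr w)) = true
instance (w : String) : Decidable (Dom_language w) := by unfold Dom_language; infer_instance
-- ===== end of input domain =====

-- B replaces A's hand-written character scans by regex-style full matches (a*b / b+) after the same first-character dispatch; objective: idiomatic.

-- ===== PORT A =====
-- A's first 'for i, j in enumerate(wlist)' loop; none = fell through the loop.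
def langALoop : List Char → Nat → Nat → Option String
  | [], _, _ => none
  | j :: rest, i, n =>
    if j ≠ 'a' then
      if i + 1 ≠ n then some "rejected"
      else if j = 'b' then some "accepted"
      else langALoop rest (i + 1) n
    else langALoop rest (i + 1) n

-- A's second 'for i in wlist' loop.
def langBLoop : List Char → String
  | [] => "accepted"
  | i :: rest => if i ≠ 'b' then "rejected" else langBLoop rest

def language (w : String) : String :=
  let wlist := w.toList
  match PySem.List.pyGet? wlist 0 with   -- wlist[0]; none = IndexError, excluded by Pre_
  | none => "rejected"
  | some c0 =>
    if c0 = 'a' then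
      match langALoop wlist 0 wlist.length with
      | some r => r
      | none => "rejected"
    else if c0 = 'b' then
      langBLoop wlist
    else "rejected"

-- ===== PORT B =====
-- step-for-step port of re.fullmatch(r"a*b", w): drop the leading a*, exactly 'b' must remain
def fullmatchAStarB (cs : List Char) : Bool := cs.dropWhile (· = 'a') = ['b']
-- step-for-step port of re.fullmatch(r"b+", w): nonempty and all 'b'
def fullmatchBPlus (cs : List Char) : Bool := !cs.isEmpty && cs.all (· = 'b')

def language_alt (w : String) : String :=
  match PySem.Str.pyGet? w 0 with        -- first = w[0]; none = IndexError, excluded by Pre_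
  | none => "rejected"
  | some first =>
    if first = 'a' then
      if fullmatchAStarB w.toList then "accepted" else "rejected"
    else if first = 'b' then
      if fullmatchBPlus w.toList then "accepted" else "rejected"
    else "rejected"

-- ===== PRECONDITION & SPEC =====
-- Pre_ excludes the empty string, on which both Pythons raise IndexError at w[0].
def Pre_language (w : String) : Prop := w ≠ ""
instance (w : String) : Decidable (Pre_language w) := by unfold Pre_language; infer_instance
def pvWitness_language : String := "aab"

def Spec_language (w : String) (out : String) : Prop := out = language_alt w
instance (w : String) (out : String) : Decidable (Spec_language w out) := by unfold Spec_language; infer_instance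

-- ===== CLAIM (what is proved, stated in full; the proofs are below) =====
def Claim_equal_language : Prop := ∀ (w : String), Dom_language w → Pre_language w → Spec_language w (language w)

-- ===== LEMMAS AND PROOFS =====
theorem langALoop_eq (cs : List Char) (i : Nat) :
    (langALoop cs i (i + cs.length)).getD "rejected" =
      (if cs.dropWhile (· = 'a') = ['b'] then "accepted" else "rejected") := by
  induction cs generalizing i with
  | nil => simp [langALoop, List.dropWhile]
  | cons j rest ih =>
    by_cases hj : j = 'a'
    · subst hj
      have harith : i + ('a' :: rest).length = (i + 1) + rest.length := by
        simp [List.length_cons]; omega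
      calc (langALoop ('a' :: rest) i (i + ('a' :: rest).length)).getD "rejected"
          = (langALoop rest (i + 1) ((i + 1) + rest.length)).getD "rejected" := by
            rw [harith]; simp [langALoop]
        _ = if rest.dropWhile (· = 'a') = ['b'] then "accepted" else "rejected" := ih (i + 1)
        _ = if (('a' :: rest).dropWhile (· = 'a')) = ['b'] then "accepted" else "rejected" := by
            simp
    · rcases rest with _ | ⟨k, rest'⟩
      · by_cases hb : j = 'b' <;> simp [langALoop, hj, hb]
      · have hne : i + 1 ≠ i + (j :: k :: rest').length := by simp [List.length_cons]
        simp [langALoop, hj]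

theorem langBLoop_eq (cs : List Char) :
    langBLoop cs = (if cs.all (· = 'b') then "accepted" else "rejected") := by
  induction cs with
  | nil => simp [langBLoop]
  | cons j rest ih =>
    by_cases hj : j = 'b' <;> simp [langBLoop, hj, ih]

-- ===== VERDICT (by name: the statement is the Claim_ definition above) =====
theorem language_spec : Claim_equal_language := by
  intro w _ hpre
  unfold Spec_language language language_alt
  rcases hcs : w.toList with _ | ⟨c0, rest⟩
  · exact absurd (by simpa [String.toList_eq_nil_iff] using hcs) hpre
  · have hgetS : PySem.Str.pyGet? w 0 = some c0 := by
      simp [PySem.Str.pyGet?, PySem.List.pyGet?, PySem.List.pyIdx?, hcs]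
    have hgetL : PySem.List.pyGet? (c0 :: rest) 0 = some c0 := by
      simp [PySem.List.pyGet?, PySem.List.pyIdx?]
    rw [hgetS]
    simp only [hgetL]
    by_cases ha : c0 = 'a'
    · subst ha
      rw [if_pos rfl, if_pos rfl]
      have h := langALoop_eq ('a' :: rest) 0
      simp only [Nat.zero_add] at h
      cases hm : langALoop ('a' :: rest) 0 ('a' :: rest).length with
      | none => simp [fullmatchAStarB] at h ⊢; split at h <;> simp_all
      | some r => simp [fullmatchAStarB] at h ⊢; split at h <;> simp_all
    · rw [if_neg ha, if_neg ha]
      by_cases hb : c0 = 'b'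
      · subst hb
        rw [if_pos rfl, if_pos rfl, langBLoop_eq]
        simp [fullmatchBPlus]
      · rw [if_neg hb, if_neg hb]
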